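-- pv_equiv track=rewrite | github.com/CodingJudo/lokalizebypass | src/select.py | batch_by_prefix
-- ===== SOURCE A (Python) =====
-- from typing import List, Dict, Any
-- from collections import defaultdict
--
-- def batch_by_prefix(
--     items: List[Dict[str, Any]],
--     prefix_length: int = 2,
--     batch_size: int = 10
-- ) -> List[List[Dict[str, Any]]]:
--     """
--     Batch items by key prefix with stable ordering.
--
--     Groups items by the first N characters of the key,
--     then batches within each prefix group.
--
--     Args:
--         items: List of items to batch, each with "key" field
--         prefix_length: Length of prefix to group by (default: 2)
--         batch_size: Maximum items per batch (default: 10)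
--
--     Returns:
--         List of batches, each batch is a list of items
--     """
--     # Group by prefix
--     by_prefix = defaultdict(list)
--
--     for item in items:
--         key = item["key"]
--         prefix = key[:prefix_length] if len(key) >= prefix_length else key
--         by_prefix[prefix].append(item)
--
--     # Create batches within each prefix
--     batches = []
--
--     # Sort prefixes for deterministic ordering
--     for prefix in sorted(by_prefix.keys()):
--         prefix_items = by_prefix[prefix]
--
--         # Sort items by key for stable ordering
--         prefix_items.sort(key=lambda x: x["key"])
--
--         # Batch items
--         for i in range(0, len(prefix_items), batch_size):
--             batch = prefix_items[i:i + batch_size]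
--             batches.append(batch)
--
--     return batches
-- ===== SOURCE B (Python) =====
-- def batch_by_prefix(items, prefix_length=2, batch_size=10):
--     def prefix_of(item):
--         # key[:prefix_length] equals A's length-guarded prefix in every case
--         return item["key"][:prefix_length]
--
--     def chunks(group):
--         return [group[i:i + batch_size] for i in range(0, len(group), batch_size)]
--
--     return [batch
--             for p in sorted({prefix_of(it) for it in items})
--             for batch in chunks(sorted((it for it in items if prefix_of(it) == p),
--                                        key=lambda x: x["key"]))]
-- ===== Notes on version B (the rewrite author's own statement) =====
-- stated objective: simpler
-- what changed: B has no mutable state at all: instead of A's defaultdict-grouping pass, in-place sorts and nested accumulator loops, it is one comprehension pipeline that maps each sorted distinct prefix key[:prefix_length] (A's length guard is a no-op) to its filtered-and-sorted group and flattens that group's slices directly into the result.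
import Mathlib
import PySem

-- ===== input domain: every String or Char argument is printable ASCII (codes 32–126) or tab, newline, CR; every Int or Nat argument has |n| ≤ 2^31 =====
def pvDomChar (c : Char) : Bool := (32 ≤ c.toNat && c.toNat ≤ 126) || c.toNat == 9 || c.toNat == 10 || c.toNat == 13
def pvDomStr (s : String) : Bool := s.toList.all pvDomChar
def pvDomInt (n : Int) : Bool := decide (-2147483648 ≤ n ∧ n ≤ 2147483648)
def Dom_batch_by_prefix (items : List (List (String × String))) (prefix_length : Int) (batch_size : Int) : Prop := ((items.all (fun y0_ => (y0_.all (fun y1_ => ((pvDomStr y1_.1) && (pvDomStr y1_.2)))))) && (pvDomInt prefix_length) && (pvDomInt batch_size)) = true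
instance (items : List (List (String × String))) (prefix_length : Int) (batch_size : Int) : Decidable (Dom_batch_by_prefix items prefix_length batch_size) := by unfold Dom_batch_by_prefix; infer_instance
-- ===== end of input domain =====

-- B replaces A's defaultdict pass and nested accumulator loops by a single comprehension
-- pipeline (flatMap/map over sorted distinct prefixes, filter per prefix); objective: simpler.


-- ===== PORT A =====
-- item["key"]: first-match lookup in the dict; Pre_ guarantees the key is present, so the
-- `getD ""` default is never reached on admitted inputs (Python raises KeyError there).
def pvKey (item : List (String × String)) : String :=
  ((PySem.Dict.ofList item).get? "key").getD ""

-- prefix = key[:prefix_length] if len(key) >= prefix_length else key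
def pvPrefA (prefix_length : Int) (k : String) : String :=
  if prefix_length ≤ (PySem.Str.len k : Int) then PySem.Str.slice k none (some prefix_length) else k

def batch_by_prefix (items : List (List (String × String))) (prefix_length : Int) (batch_size : Int) : List (List (List (String × String))) :=
  -- by_prefix = defaultdict(list); for item in items: by_prefix[prefix].append(item)
  let by_prefix : PySem.Dict String (List (List (String × String))) :=
    items.foldl (fun d item => d.modify (pvPrefA prefix_length (pvKey item)) [] (· ++ [item])) PySem.Dict.empty
  -- for prefix in sorted(by_prefix.keys()): sort group, then batch it
  (PySem.List.sorted by_prefix.keys (fun x => x) false).foldl (fun batches pfx =>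
    let prefix_items := PySem.List.sorted (by_prefix.getD pfx []) pvKey false
    (PySem.List.pyRange 0 (prefix_items.length : Int) batch_size).foldl
      (fun batches i => batches ++ [PySem.List.slice prefix_items (some i) (some (i + batch_size))]) batches) []

-- ===== PORT B =====
-- prefix_of(item) = item["key"][:prefix_length] (no guard)
def pvPrefB (prefix_length : Int) (item : List (String × String)) : String :=
  PySem.Str.slice (pvKey item) none (some prefix_length)

-- chunks(group) = [group[i:i+batch_size] for i in range(0, len(group), batch_size)]
def pvChunks (batch_size : Int) (group : List (List (String × String))) : List (List (List (String × String))) :=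
  (PySem.List.pyRange 0 (group.length : Int) batch_size).map
    (fun i => PySem.List.slice group (some i) (some (i + batch_size)))

def batch_by_prefix_alt (items : List (List (String × String))) (prefix_length : Int) (batch_size : Int) : List (List (List (String × String))) :=
  -- [batch for p in sorted({prefix_of(it)}) for batch in chunks(sorted(filter, key))]
  (PySem.List.sorted (PySem.Set.ofList (items.map (pvPrefB prefix_length))) (fun x => x) false).flatMap
    (fun p => pvChunks batch_size
      (PySem.List.sorted (items.filter (fun it => pvPrefB prefix_length it == p)) pvKey false))

-- ===== PRECONDITION & SPEC =====
-- Pre_ excludes exactly where the Python A raises: a dict without a "key" entry (KeyError)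
-- and batch_size = 0 with a nonempty items list (ValueError from range(..., 0)).
def Pre_batch_by_prefix (items : List (List (String × String))) (prefix_length : Int) (batch_size : Int) : Prop :=
  (∀ item ∈ items, "key" ∈ item.map (·.1)) ∧ (items ≠ [] → batch_size ≠ 0)
instance (items : List (List (String × String))) (prefix_length : Int) (batch_size : Int) : Decidable (Pre_batch_by_prefix items prefix_length batch_size) := by unfold Pre_batch_by_prefix; infer_instance

def pvWitness_batch_by_prefix : (List (List (String × String))) × Int × Int :=
  ([[("key", "ab"), ("v", "1")], [("key", "ac"), ("v", "2")], [("key", "b"), ("v", "3")]], 1, 1)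

def Spec_batch_by_prefix (items : List (List (String × String))) (prefix_length : Int) (batch_size : Int) (out : List (List (List (String × String)))) : Prop := out = batch_by_prefix_alt items prefix_length batch_size
instance (items : List (List (String × String))) (prefix_length : Int) (batch_size : Int) (out : List (List (List (String × String)))) : Decidable (Spec_batch_by_prefix items prefix_length batch_size out) := by unfold Spec_batch_by_prefix; infer_instance

-- ===== CLAIM (what is proved, stated in full; the proofs are below) =====
def Claim_equal_batch_by_prefix : Prop := ∀ (items : List (List (String × String))) (prefix_length : Int) (batch_size : Int), Dom_batch_by_prefix items prefix_length batch_size → Pre_batch_by_prefix items prefix_length batch_size → Spec_batch_by_prefix items prefix_length batch_size (batch_by_prefix items prefix_length batch_size)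

-- ===== LEMMAS AND PROOFS =====

-- A's length guard is a no-op: key[:L] = key whenever L ≥ len(key).
lemma prefA_eq_prefB (L : Int) (it : List (String × String)) :
    pvPrefA L (pvKey it) = pvPrefB L it := by
  unfold pvPrefA pvPrefB
  set k := pvKey it
  split_ifs with h
  · rfl
  · have hlt : (PySem.Str.len k : Int) < L := not_le.mp h
    have h0 : 0 ≤ L := le_of_lt (lt_of_le_of_lt (Int.natCast_nonneg _) hlt)
    apply String.toList_inj.mp
    rw [PySem.Str.toList_slice]
    simp only [PySem.Chars.slice_eq_listSlice]
    rw [PySem.List.slice_to _ h0]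
    symm
    apply List.take_of_length_le
    have := PySem.Str.len_eq k
    omega

lemma keys_fold (items : List (List (String × String))) (L : Int) :
    (items.foldl (fun d item => d.modify (pvPrefA L (pvKey item)) [] (· ++ [item]))
      (PySem.Dict.empty : PySem.Dict String (List (List (String × String))))).keys
    = PySem.Set.ofList (items.map (pvPrefB L)) := by
  simp only [prefA_eq_prefB]
  rw [PySem.Dict.keys_foldl_modify_key items (pvPrefB L) []
    (fun _ item v => v ++ [item])]
  simp [PySem.Set.update, PySem.Set.ofList_eq_foldl]

lemma getD_fold (items : List (List (String × String))) (L : Int) (p : String) :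
    (items.foldl (fun d item => d.modify (pvPrefA L (pvKey item)) [] (· ++ [item]))
      (PySem.Dict.empty : PySem.Dict String (List (List (String × String))))).getD p []
    = items.filter (fun item => pvPrefB L item == p) := by
  simp only [prefA_eq_prefB]
  have h : (items.map (fun item => (pvPrefB L item, item))).foldl
      (fun d q => d.modify q.1 [] (· ++ [q.2]))
      (PySem.Dict.empty : PySem.Dict String (List (List (String × String))))
      = items.foldl (fun d item => d.modify (pvPrefB L item) [] (· ++ [item])) PySem.Dict.empty :=
    List.foldl_map
  rw [← h, PySem.Dict.getD_foldl_modify_append, PySem.Dict.getD_empty, List.filter_map,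
    List.map_map]
  simp [Function.comp_def]

-- foldl pushing one element per step is a map appended to the accumulator
lemma foldl_push {α β : Type} (l : List α) (f : α → β) (acc : List β) :
    l.foldl (fun a x => a ++ [f x]) acc = acc ++ l.map f := by
  induction l generalizing acc with
  | nil => simp
  | cons x xs ih => simp [List.foldl_cons, ih]

-- ===== VERDICT (by name: the statement is the Claim_ definition above) =====
theorem batch_by_prefix_spec : Claim_equal_batch_by_prefix := by
  intro items L bs _ _
  unfold Spec_batch_by_prefix batch_by_prefix batch_by_prefix_alt
  dsimp only
  rw [keys_fold]
  generalize PySem.List.sorted (PySem.Set.ofList (items.map (pvPrefB L))) (fun x => x) false = ps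
  have hstep : ∀ (group : List (List (String × String)))
      (acc : List (List (List (String × String)))),
      (PySem.List.pyRange 0 (group.length : Int) bs).foldl
        (fun batches i => batches ++ [PySem.List.slice group (some i) (some (i + bs))]) acc
      = acc ++ pvChunks bs group := by
    intro group acc
    rw [foldl_push]
    rfl
  have hrest : ∀ (acc : List (List (List (String × String)))),
      ps.foldl (fun batches pfx =>
        (PySem.List.pyRange 0
          ((PySem.List.sorted ((items.foldl (fun d item =>
              d.modify (pvPrefA L (pvKey item)) [] (fun v => v ++ [item])) PySem.Dict.empty).getD pfx [])
              pvKey false).length : Int) bs).foldl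
          (fun batches i => batches ++ [PySem.List.slice
            (PySem.List.sorted ((items.foldl (fun d item =>
              d.modify (pvPrefA L (pvKey item)) [] (fun v => v ++ [item])) PySem.Dict.empty).getD pfx [])
              pvKey false) (some i) (some (i + bs))]) batches) acc
      = acc ++ ps.flatMap (fun pfx => pvChunks bs
          (PySem.List.sorted (items.filter (fun it => pvPrefB L it == pfx)) pvKey false)) := by
    induction ps with
    | nil => intro acc; simp
    | cons q qs ihq =>
      intro acc
      rw [List.foldl_cons, hstep, getD_fold, ihq, List.flatMap_cons, List.append_assoc]
  rw [hrest]
  rfl
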